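-- pv_equiv track=rewrite | github.com/DimitrisChousiadas/Algorithms-Programming | Python/smallest_common_element.py | find_sce
-- ===== SOURCE A (Python) =====
-- def find_sce (arr1, arr2):
--
--     s = set()
--     for i in arr1:
--         s.add(i)
--
--     i = 0
--     flag = False
--     while i < len(arr2) and not flag:
--         if arr2[i] in s:
--             sce = arr2[i]
--             flag = True
--         i += 1
--     while i < len(arr2):
--         if arr2[i] < sce and arr2[i] in s:
--             sce = arr2[i]
--         i += 1
--
--     if flag:
--         return (True, sce)
--     else:
--         return (False, 0)
-- ===== SOURCE B (Python) =====
-- def find_sce(arr1, arr2):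
--     common = set(arr1) & set(arr2)
--     if common:
--         return (True, min(common))
--     return (False, 0)
-- ===== Notes on version B (the rewrite author's own statement) =====
-- stated objective: simpler
-- what changed: Replaces A's two-phase guarded index scan with a running minimum by a set intersection followed by a single min over the intersection.
import Mathlib
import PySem

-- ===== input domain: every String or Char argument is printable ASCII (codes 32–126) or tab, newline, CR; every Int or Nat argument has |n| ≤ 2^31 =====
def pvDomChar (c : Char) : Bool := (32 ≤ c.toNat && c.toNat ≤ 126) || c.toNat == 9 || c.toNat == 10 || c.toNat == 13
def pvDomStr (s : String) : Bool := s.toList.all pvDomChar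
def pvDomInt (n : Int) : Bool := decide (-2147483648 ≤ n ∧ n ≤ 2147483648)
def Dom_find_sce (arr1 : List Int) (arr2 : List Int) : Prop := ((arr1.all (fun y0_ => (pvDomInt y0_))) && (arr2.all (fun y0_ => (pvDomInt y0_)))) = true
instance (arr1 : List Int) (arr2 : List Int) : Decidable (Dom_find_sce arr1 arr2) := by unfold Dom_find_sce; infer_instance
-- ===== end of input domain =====

-- B is a simpler re-implementation (set intersection + one min) of A's two-phase scan; return values proved equal on all inputs.

-- ===== PORT A =====
-- the first while loop of A: scan until the first element of arr2 that is in s,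
-- returning it together with the unscanned remainder (none = flag stayed False)
def pvFindFirst (s : PySem.Set Int) : List Int → Option (Int × List Int)
  | [] => none
  | x :: rest => if PySem.Set.contains s x then some (x, rest) else pvFindFirst s rest

def find_sce (arr1 : List Int) (arr2 : List Int) : Bool × Int :=
  let s : PySem.Set Int := arr1.foldl (fun s i => PySem.Set.add s i) PySem.Set.empty
  match pvFindFirst s arr2 with
  | none => (false, 0)
  | some (sce0, rest) =>
      -- the second while loop: running minimum over the remaining common elements
      (true, rest.foldl (fun sce x =>
        if x < sce ∧ PySem.Set.contains s x = true then x else sce) sce0)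

-- ===== PORT B =====
def find_sce_alt (arr1 : List Int) (arr2 : List Int) : Bool × Int :=
  let common : PySem.Set Int :=
    PySem.Set.inter (PySem.Set.ofList arr1) (PySem.Set.ofList arr2)
  match PySem.List.min? common (fun x => x) with
  | some m => (true, m)
  | none => (false, 0)

-- ===== PRECONDITION & SPEC =====
def Spec_find_sce (arr1 : List Int) (arr2 : List Int) (out : Bool × Int) : Prop := out = find_sce_alt arr1 arr2
instance (arr1 : List Int) (arr2 : List Int) (out : Bool × Int) : Decidable (Spec_find_sce arr1 arr2 out) := by unfold Spec_find_sce; infer_instance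

-- ===== CLAIM (what is proved, stated in full; the proofs are below) =====
def Claim_equal_find_sce : Prop := ∀ (arr1 : List Int) (arr2 : List Int), Dom_find_sce arr1 arr2 → Spec_find_sce arr1 arr2 (find_sce arr1 arr2)

-- ===== LEMMAS AND PROOFS =====

-- the first loop found nothing: no element of the list is in s
lemma pvFindFirst_none {s : PySem.Set Int} {l : List Int}
    (h : pvFindFirst s l = none) : ∀ x ∈ l, PySem.Set.contains s x = false := by
  induction l with
  | nil => intro x hx; cases hx
  | cons a t ih =>
      intro x hx
      simp only [pvFindFirst] at h
      by_cases hc : PySem.Set.contains s a = true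
      · rw [if_pos hc] at h; cases h
      · rw [if_neg hc] at h
        rcases List.mem_cons.mp hx with hx | hx
        · subst hx; exact Bool.eq_false_iff.mpr hc
        · exact ih h x hx

-- the first loop's result: head is common, and membership among common elements splits as shown
lemma pvFindFirst_some {s : PySem.Set Int} {l : List Int} {c : Int} {rest : List Int}
    (h : pvFindFirst s l = some (c, rest)) :
    PySem.Set.contains s c = true ∧
    (∀ x, (x ∈ l ∧ PySem.Set.contains s x = true) ↔
          (x = c ∨ (x ∈ rest ∧ PySem.Set.contains s x = true))) := by
  induction l with
  | nil => cases h
  | cons a t ih =>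
      simp only [pvFindFirst] at h
      by_cases hc : PySem.Set.contains s a = true
      · rw [if_pos hc] at h
        have h' := Option.some.inj h
        simp only [Prod.mk.injEq] at h'
        obtain ⟨rfl, rfl⟩ := h'
        refine ⟨hc, ?_⟩
        intro x
        constructor
        · rintro ⟨hx, hxs⟩
          rcases List.mem_cons.mp hx with hx | hx
          · exact Or.inl hx
          · exact Or.inr ⟨hx, hxs⟩
        · rintro (hx | ⟨hx, hxs⟩)
          · exact ⟨by simp [hx], by simpa [hx] using hc⟩
          · exact ⟨List.mem_cons_of_mem _ hx, hxs⟩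
      · rw [if_neg hc] at h
        rcases ih h with ⟨h1, h2⟩
        refine ⟨h1, ?_⟩
        intro x
        constructor
        · rintro ⟨hx, hxs⟩
          rcases List.mem_cons.mp hx with hx | hx
          · exact absurd (hx ▸ hxs) hc
          · exact (h2 x).mp ⟨hx, hxs⟩
        · intro hx
          have := (h2 x).mpr hx
          exact ⟨List.mem_cons_of_mem _ this.1, this.2⟩

-- the second loop is a running minimum over the common elements of rest
lemma pvFoldl_step_eq_min (s : PySem.Set Int) (rest : List Int) (c : Int) :
    rest.foldl (fun sce x => if x < sce ∧ PySem.Set.contains s x = true then x else sce) c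
      = (rest.filter (fun x => PySem.Set.contains s x)).foldl min c := by
  induction rest generalizing c with
  | nil => rfl
  | cons a t ih =>
      rw [List.foldl_cons, List.filter_cons]
      by_cases hc : PySem.Set.contains s a = true
      · rw [if_pos hc, List.foldl_cons, ih]
        have hmin : (if a < c ∧ PySem.Set.contains s a = true then a else c) = min c a := by
          simp only [hc, and_true]
          rw [min_def]
          split_ifs <;> omega
        rw [hmin]
      · rw [if_neg hc, if_neg (fun hcontra => hc hcontra.2), ih]

-- two nonempty lists with the same members have the same min? (key = identity)
lemma min?_congr_mem {l1 l2 : List Int} {m1 m2 : Int}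
    (h1 : PySem.List.min? l1 (fun x => x) = some m1)
    (h2 : PySem.List.min? l2 (fun x => x) = some m2)
    (hmem : ∀ x, x ∈ l1 ↔ x ∈ l2) : m1 = m2 := by
  have hm1 : m1 ∈ l1 := PySem.List.min?_mem h1
  have hm2 : m2 ∈ l2 := PySem.List.min?_mem h2
  have h12 : m1 ≤ m2 := PySem.List.min?_isMin h1 m2 ((hmem m2).mpr hm2)
  have h21 : m2 ≤ m1 := PySem.List.min?_isMin h2 m1 ((hmem m1).mp hm1)
  omega

-- membership in B's intersection set
lemma mem_common (arr1 arr2 : List Int) (x : Int) :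
    x ∈ PySem.Set.inter (PySem.Set.ofList arr1) (PySem.Set.ofList arr2) ↔
    x ∈ arr1 ∧ x ∈ arr2 := by
  rw [PySem.Set.mem_inter, PySem.Set.mem_ofList, PySem.Set.mem_ofList]

-- A's set s is set(arr1)
lemma s_eq_ofList (arr1 : List Int) :
    arr1.foldl (fun s i => PySem.Set.add s i) PySem.Set.empty = PySem.Set.ofList arr1 :=
  (PySem.Set.ofList_eq_foldl arr1).symm

-- ===== VERDICT (by name: the statement is the Claim_ definition above) =====
theorem find_sce_spec : Claim_equal_find_sce := by
  intro arr1 arr2 _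
  unfold Spec_find_sce
  simp only [find_sce, find_sce_alt, s_eq_ofList]
  have hmemc : ∀ x, x ∈ PySem.Set.inter (PySem.Set.ofList arr1) (PySem.Set.ofList arr2) ↔
      (x ∈ arr2 ∧ PySem.Set.contains (PySem.Set.ofList arr1) x = true) := by
    intro x
    rw [mem_common, PySem.Set.contains_iff, PySem.Set.mem_ofList]
    tauto
  cases hfind : pvFindFirst (PySem.Set.ofList arr1) arr2 with
  | none =>
      have hnone := pvFindFirst_none hfind
      have hcnil : PySem.Set.inter (PySem.Set.ofList arr1) (PySem.Set.ofList arr2) = [] := by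
        rcases hc : PySem.Set.inter (PySem.Set.ofList arr1) (PySem.Set.ofList arr2) with _ | ⟨y, ys⟩
        · rfl
        · exfalso
          have hy : y ∈ PySem.Set.inter (PySem.Set.ofList arr1) (PySem.Set.ofList arr2) := by
            rw [hc]; exact List.mem_cons_self
          have h1 := (hmemc y).mp hy
          have h2 := hnone y h1.1
          rw [h2] at h1
          exact Bool.false_ne_true h1.2
      rw [hcnil]
      rfl
  | some p =>
      rcases p with ⟨c, rest⟩
      rcases pvFindFirst_some hfind with ⟨hcs, hsplit⟩
      have hcmem : c ∈ PySem.Set.inter (PySem.Set.ofList arr1) (PySem.Set.ofList arr2) := by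
        rw [hmemc]
        exact (hsplit c).mpr (Or.inl rfl)
      cases hm : PySem.List.min? (PySem.Set.inter (PySem.Set.ofList arr1) (PySem.Set.ofList arr2)) (fun x => x) with
      | none =>
          rw [PySem.List.min?_eq_none_iff] at hm
          rw [hm] at hcmem
          cases hcmem
      | some m =>
          have hA : PySem.List.min? (c :: (rest.filter (fun x => PySem.Set.contains (PySem.Set.ofList arr1) x))) (fun x => x)
              = some ((rest.filter (fun x => PySem.Set.contains (PySem.Set.ofList arr1) x)).foldl min c) :=
            PySem.List.min?_id_cons c _
          have hmem : ∀ x, x ∈ c :: (rest.filter (fun x => PySem.Set.contains (PySem.Set.ofList arr1) x)) ↔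
              x ∈ PySem.Set.inter (PySem.Set.ofList arr1) (PySem.Set.ofList arr2) := by
            intro x
            rw [hmemc]
            constructor
            · intro hx
              rcases List.mem_cons.mp hx with hx | hx
              · exact (hsplit x).mpr (Or.inl hx)
              · rcases List.mem_filter.mp hx with ⟨hx1, hx2⟩
                exact (hsplit x).mpr (Or.inr ⟨hx1, by simpa using hx2⟩)
            · intro hx
              rcases (hsplit x).mp hx with hx | ⟨hx1, hx2⟩
              · exact List.mem_cons.mpr (Or.inl hx)
              · exact List.mem_cons.mpr (Or.inr (List.mem_filter.mpr ⟨hx1, by simpa using hx2⟩))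
          have heq := min?_congr_mem hA hm hmem
          show (true, rest.foldl (fun sce x => if x < sce ∧ PySem.Set.contains (PySem.Set.ofList arr1) x = true then x else sce) c) = (true, m)
          rw [pvFoldl_step_eq_min, heq]
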